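-- pv_equiv track=rewrite | github.com/AranchaSmartmind/SmartMind-Convocatorias | sections/evaluacion/cierre_mes/utilidades.py | buscar_coincidencia
-- ===== SOURCE A (Python) =====
-- def normalizar_nombre(nombre):
--     """
--     Normaliza un nombre para facilitar comparaciones
--
--     Args:
--         nombre: Nombre a normalizar
--
--     Returns:
--         str: Nombre normalizado en mayúsculas sin espacios extras
--     """
--     return ' '.join(nombre.upper().split())
--
-- def buscar_coincidencia(nombre_buscar, diccionario):
--     """
--     Busca un nombre en un diccionario con coincidencia flexible
--     Útil para relacionar datos entre diferentes fuentes
--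
--     Args:
--         nombre_buscar: Nombre a buscar
--         diccionario: Diccionario donde buscar
--
--     Returns:
--         El valor encontrado o None
--     """
--     if not diccionario:
--         return None
--
--     nombre_norm = normalizar_nombre(nombre_buscar)
--
--     # Extraer apellidos
--     if ',' in nombre_norm:
--         apellidos = nombre_norm.split(',')[0].strip()
--     else:
--         apellidos = nombre_norm.split()[0] if nombre_norm.split() else nombre_norm
--
--     # Búsqueda exacta
--     for key in diccionario.keys():
--         if normalizar_nombre(key) == nombre_norm:
--             return diccionario[key]
--
--     # Búsqueda por apellidos
--     for key in diccionario.keys():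
--         key_norm = normalizar_nombre(key)
--
--         if ',' in key_norm:
--             key_apellidos = key_norm.split(',')[0].strip()
--         else:
--             key_apellidos = key_norm.split()[0] if key_norm.split() else key_norm
--
--         # Comparar apellidos
--         if apellidos in key_norm or key_apellidos in nombre_norm:
--             return diccionario[key]
--
--     return None
-- ===== SOURCE B (Python) =====
-- def _norm(s):
--     return ' '.join(s.upper().split())
--
-- def _primer_apellido(norm):
--     if ',' in norm:
--         return norm.split(',')[0].strip()
--     palabras = norm.split()
--     return palabras[0] if palabras else norm
--
-- def buscar_coincidencia(nombre_buscar, diccionario):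
--     if not diccionario:
--         return None
--     nombre_norm = _norm(nombre_buscar)
--     apellidos = _primer_apellido(nombre_norm)
--     fallback = None
--     for key, valor in diccionario.items():
--         key_norm = _norm(key)
--         if key_norm == nombre_norm:
--             return valor
--         if fallback is None:
--             if apellidos in key_norm or _primer_apellido(key_norm) in nombre_norm:
--                 fallback = valor
--     return fallback
-- ===== Notes on version B (the rewrite author's own statement) =====
-- stated objective: alternative
-- what changed: B replaces A's two sequential scans (exact-match scan, then surname scan) by a single pass that normalizes each key once, returns immediately on an exact match, and remembers only the first surname-match value as a fallback returned after the loop.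
import Mathlib
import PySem

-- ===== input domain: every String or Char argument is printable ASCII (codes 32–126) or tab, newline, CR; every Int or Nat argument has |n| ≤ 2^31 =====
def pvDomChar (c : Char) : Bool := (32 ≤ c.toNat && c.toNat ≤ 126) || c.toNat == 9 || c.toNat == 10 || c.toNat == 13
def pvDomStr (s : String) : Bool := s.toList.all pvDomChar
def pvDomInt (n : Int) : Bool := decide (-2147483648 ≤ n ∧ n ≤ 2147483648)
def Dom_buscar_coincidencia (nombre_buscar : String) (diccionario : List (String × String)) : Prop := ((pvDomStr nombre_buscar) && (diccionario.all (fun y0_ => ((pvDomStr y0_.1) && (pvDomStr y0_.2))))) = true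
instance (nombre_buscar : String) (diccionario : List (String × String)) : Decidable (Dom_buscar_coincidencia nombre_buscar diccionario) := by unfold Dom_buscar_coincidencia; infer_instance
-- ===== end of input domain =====

-- B: one pass over the dict that returns on an exact match and remembers the first surname-match value as a fallback, instead of A's two sequential scans; same return value.
-- ===== PORT A =====
-- normalizar_nombre(nombre) = ' '.join(nombre.upper().split())
def pvNorm (s : String) : String :=
  PySem.Str.join " " (PySem.Str.split₀ (PySem.Str.upper s))

-- apellido-extraction applied to an (already computed) normalized name, as both programs write it
def pvApe (nm : String) : String :=
  if PySem.Str.isIn "," nm then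
    PySem.Str.strip (PySem.List.pyGetD ((PySem.Str.split? nm ",").getD []) 0 "")
  else
    match PySem.Str.split₀ nm with
    | [] => nm
    | w :: _ => w

-- first loop of A: exact search
def pvExact (nm : String) : List (String × String) → Option String
  | [] => none
  | (k, v) :: rest => if pvNorm k = nm then some v else pvExact nm rest

-- second loop of A: surname search
def pvApeLoop (nm ape : String) : List (String × String) → Option String
  | [] => none
  | (k, v) :: rest =>
    let key_norm := pvNorm k
    let key_ape := pvApe key_norm
    if PySem.Str.isIn ape key_norm || PySem.Str.isIn key_ape nm then some v
    else pvApeLoop nm ape rest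

def buscar_coincidencia (nombre_buscar : String) (diccionario : List (String × String)) : Option String :=
  if diccionario = [] then none
  else
    let nombre_norm := pvNorm nombre_buscar
    let apellidos := pvApe nombre_norm
    match pvExact nombre_norm diccionario with
    | some v => some v
    | none => pvApeLoop nombre_norm apellidos diccionario

-- ===== PORT B =====
-- the single pass of B: exact match returns at once, first surname match is recorded in fallback
def pvScan (nm ape : String) (fallback : Option String) : List (String × String) → Option String
  | [] => fallback
  | (k, v) :: rest =>
    let key_norm := pvNorm k
    if key_norm = nm then some v
    else
      let fallback' :=
        match fallback with
        | some _ => fallback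
        | none =>
          if PySem.Str.isIn ape key_norm || PySem.Str.isIn (pvApe key_norm) nm then some v
          else none
      pvScan nm ape fallback' rest

def buscar_coincidencia_alt (nombre_buscar : String) (diccionario : List (String × String)) : Option String :=
  if diccionario = [] then none
  else
    let nombre_norm := pvNorm nombre_buscar
    let apellidos := pvApe nombre_norm
    pvScan nombre_norm apellidos none diccionario

-- ===== PRECONDITION & SPEC =====
def Spec_buscar_coincidencia (nombre_buscar : String) (diccionario : List (String × String)) (out : Option String) : Prop := out = buscar_coincidencia_alt nombre_buscar diccionario
instance (nombre_buscar : String) (diccionario : List (String × String)) (out : Option String) : Decidable (Spec_buscar_coincidencia nombre_buscar diccionario out) := by unfold Spec_buscar_coincidencia; infer_instance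

-- ===== CLAIM (what is proved, stated in full; the proofs are below) =====
def Claim_equal_buscar_coincidencia : Prop := ∀ (nombre_buscar : String) (diccionario : List (String × String)), Dom_buscar_coincidencia nombre_buscar diccionario → Spec_buscar_coincidencia nombre_buscar diccionario (buscar_coincidencia nombre_buscar diccionario)

-- ===== LEMMAS AND PROOFS =====

-- the loop invariant: a scan with fallback fb equals A's exact search, then fb, then A's surname search
theorem pvScan_eq (nm ape : String) (fb : Option String) (d : List (String × String)) :
    pvScan nm ape fb d =
      match pvExact nm d with
      | some v => some v
      | none => match fb with
        | some w => some w
        | none => pvApeLoop nm ape d := by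
  induction d generalizing fb with
  | nil => cases fb <;> rfl
  | cons p rest ih =>
    obtain ⟨k, v⟩ := p
    simp only [pvScan, pvExact, pvApeLoop]
    by_cases hx : pvNorm k = nm
    · simp [hx]
    · simp only [if_neg hx]
      cases fb with
      | some w => simpa using ih (some w)
      | none =>
        by_cases hc : (PySem.Str.isIn ape (pvNorm k) || PySem.Str.isIn (pvApe (pvNorm k)) nm) = true
        · simp only [hc, if_true]
          rw [ih (some v)]
        · simp only [Bool.not_eq_true] at hc
          simp only [hc, Bool.false_eq_true, if_false]
          exact ih none

-- ===== VERDICT (by name: the statement is the Claim_ definition above) =====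
theorem buscar_coincidencia_spec : Claim_equal_buscar_coincidencia := by
  intro nombre_buscar diccionario _
  unfold Spec_buscar_coincidencia buscar_coincidencia buscar_coincidencia_alt
  by_cases hd : diccionario = []
  · simp [hd]
  · simp only [hd, if_false]
    rw [pvScan_eq]
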